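-- pv_equiv track=rewrite | github.com/ruppysuppy/Daily-Coding-Problem-Solutions | Solutions/199.py | get_min_changes_helper
-- ===== SOURCE A (Python) =====
-- def get_min_changes_helper(string, modifications, stack, current):
--     # base case for recursion (both the string and the stack is exhausted)
--     if not string and not stack:
--         return modifications, current
--     # base case for recursion (the string is exhausted and the stack still has elements)
--     elif not string:
--         additions = len(stack)
--         return modifications + additions, current + (")" * additions)
--
--     # if the current element is "("
--     if string[0] == "(":
--         # getting the modifications and the strings for adding the element to the stack or modifying it
--         modifications1, string1 = get_min_changes_helper(
--             string[1:], modifications, stack + ["("], current + "("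
--         )
--         modifications2, string2 = get_min_changes_helper(
--             string[1:], modifications + 1, stack, current
--         )
--
--         # returning the required element
--         return min(
--             [(modifications1, string1), (modifications2, string2)],
--             key=lambda tup: tup[0],
--         )
--
--     # if the current element is ")"
--     else:
--         # if the stack holds elements, 1 "(" is poped and getting the modifications and the string
--         if stack:
--             stack.pop()
--             return get_min_changes_helper(
--                 string[1:], modifications, stack, current + ")"
--             )
--         # else modifications is incremented and getting the modifications and the string
--         else:
--             return get_min_changes_helper(string[1:], modifications + 1, stack, current)
-- ===== SOURCE B (Python) =====
-- def get_min_changes_helper(string, modifications, stack, current):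
--     # Greedy single pass: keep every "(", match ")" against the open count,
--     # drop unmatchable ")" (one change each), close residual opens at the end.
--     depth = len(stack)
--     out = []
--     for ch in string:
--         if ch == "(":
--             depth += 1
--             out.append("(")
--         elif depth:
--             depth -= 1
--             out.append(")")
--         else:
--             modifications += 1
--     return modifications + depth, current + "".join(out) + ")" * depth
-- ===== Notes on version B (the rewrite author's own statement) =====
-- stated objective: faster
-- what changed: Replaced the exponential branching recursion (two recursive calls per '(') with a single greedy pass that keeps every '(', matches ')' against an open counter, drops unmatchable ')' and appends the residual opens as ')' at the end.
import Mathlib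
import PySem

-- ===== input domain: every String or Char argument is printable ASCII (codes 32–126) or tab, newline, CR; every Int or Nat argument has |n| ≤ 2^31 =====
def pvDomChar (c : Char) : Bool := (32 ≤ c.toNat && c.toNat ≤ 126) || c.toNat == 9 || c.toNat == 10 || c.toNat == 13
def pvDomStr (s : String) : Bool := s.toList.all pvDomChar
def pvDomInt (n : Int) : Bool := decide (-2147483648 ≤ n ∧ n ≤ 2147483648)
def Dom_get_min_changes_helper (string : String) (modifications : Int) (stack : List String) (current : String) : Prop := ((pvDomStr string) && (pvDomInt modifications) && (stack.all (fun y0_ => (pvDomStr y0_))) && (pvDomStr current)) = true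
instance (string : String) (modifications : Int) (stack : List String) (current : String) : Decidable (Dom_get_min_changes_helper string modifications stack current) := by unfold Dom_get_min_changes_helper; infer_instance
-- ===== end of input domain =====

-- B replaces A's exponential two-way branching recursion by a greedy single pass (asymptotically faster,
-- measured); equivalence is about the RETURN value only (Python A pops from the caller's stack list in place, B does not).


-- ===== PORT A =====
-- A's recursion, transliterated over List Char (string/current handled via toList/String.mk;
-- PySem.Str functions are defined over List Char, this is exact on the domain).
-- stack.pop() removes the LAST element: List.dropLast.
def gmchA : List Char → Int → List String → List Char → Int × List Char
  | [], m, st, cur =>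
    -- base cases: string exhausted; stack empty vs non-empty
    if st.isEmpty then (m, cur)
    else (m + st.length, cur ++ List.replicate st.length ')')
  | c :: rest, m, st, cur =>
    if c = '(' then
      let r1 := gmchA rest m (st ++ ["("]) (cur ++ ['('])
      let r2 := gmchA rest (m + 1) st cur
      -- Python min([t1, t2], key=fst): first minimal element
      if r1.1 ≤ r2.1 then r1 else r2
    else
      if st.isEmpty then gmchA rest (m + 1) st cur
      else gmchA rest m st.dropLast (cur ++ [')'])

def get_min_changes_helper (string : String) (modifications : Int) (stack : List String) (current : String) : Int × String :=
  let r := gmchA string.toList modifications stack current.toList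
  (r.1, String.mk r.2)

-- ===== PORT B =====
-- Source B's for-loop over ch in string, with state (modifications, depth, out).
def bLoop : List Char → Int → Nat → List Char → Int × Nat × List Char
  | [], m, d, out => (m, d, out)
  | c :: rest, m, d, out =>
    if c = '(' then bLoop rest m (d + 1) (out ++ ['('])
    else
      match d with
      | Nat.succ d' => bLoop rest m d' (out ++ [')'])
      | 0 => bLoop rest (m + 1) 0 out

def get_min_changes_helper_alt (string : String) (modifications : Int) (stack : List String) (current : String) : Int × String :=
  let r := bLoop string.toList modifications stack.length []
  (r.1 + r.2.1, String.mk (current.toList ++ r.2.2 ++ List.replicate r.2.1 ')'))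

-- ===== PRECONDITION & SPEC =====
def Spec_get_min_changes_helper (string : String) (modifications : Int) (stack : List String) (current : String) (out : Int × String) : Prop := out = get_min_changes_helper_alt string modifications stack current
instance (string : String) (modifications : Int) (stack : List String) (current : String) (out : Int × String) : Decidable (Spec_get_min_changes_helper string modifications stack current out) := by unfold Spec_get_min_changes_helper; infer_instance

-- ===== CLAIM (what is proved, stated in full; the proofs are below) =====
def Claim_equal_get_min_changes_helper : Prop := ∀ (string : String) (modifications : Int) (stack : List String) (current : String), Dom_get_min_changes_helper string modifications stack current → Spec_get_min_changes_helper string modifications stack current (get_min_changes_helper string modifications stack current)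

-- ===== LEMMAS AND PROOFS =====

-- pure greedy recursion used only by the proofs: (extra changes, final depth, kept characters)
def gre : List Char → Nat → Int × Nat × List Char
  | [], d => (0, d, [])
  | c :: rest, d =>
    if c = '(' then
      let r := gre rest (d + 1)
      (r.1, r.2.1, '(' :: r.2.2)
    else
      match d with
      | Nat.succ d' =>
        let r := gre rest d'
        (r.1, r.2.1, ')' :: r.2.2)
      | 0 =>
        let r := gre rest 0
        (r.1 + 1, r.2.1, r.2.2)

theorem bLoop_eq_gre : ∀ (cs : List Char) (m : Int) (d : Nat) (acc : List Char),
    bLoop cs m d acc = (m + (gre cs d).1, (gre cs d).2.1, acc ++ (gre cs d).2.2) := by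
  intro cs
  induction cs with
  | nil => intro m d acc; simp [bLoop, gre]
  | cons c rest ih =>
    intro m d acc
    by_cases hc : c = '('
    · simp [bLoop, gre, hc, ih]
    · cases d with
      | zero => simp [bLoop, gre, hc, ih]; ring
      | succ d' => simp [bLoop, gre, hc, ih]

-- keeping a "(" never costs more than deleting it: total cost is monotone within +1 in depth
theorem gre_mono : ∀ (cs : List Char) (d : Nat),
    (gre cs (d + 1)).1 + ((gre cs (d + 1)).2.1 : Int) ≤ (gre cs d).1 + ((gre cs d).2.1 : Int) + 1 := by
  intro cs
  induction cs with
  | nil => intro d; simp [gre]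
  | cons c rest ih =>
    intro d
    by_cases hc : c = '('
    · simpa [gre, hc] using ih (d + 1)
    · cases d with
      | zero => simp [gre, hc]; omega
      | succ d' => simpa [gre, hc] using ih d'

theorem gmchA_eq_gre : ∀ (cs : List Char) (m : Int) (st : List String) (cur : List Char),
    gmchA cs m st cur =
      (m + (gre cs st.length).1 + ((gre cs st.length).2.1 : Int),
       cur ++ (gre cs st.length).2.2 ++ List.replicate (gre cs st.length).2.1 ')') := by
  intro cs
  induction cs with
  | nil =>
    intro m st cur
    cases st with
    | nil => simp [gmchA, gre]
    | cons s st' => simp [gmchA, gre]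
  | cons c rest ih =>
    intro m st cur
    by_cases hc : c = '('
    · have h1 := ih m (st ++ ["("]) (cur ++ ['('])
      have h2 := ih (m + 1) st cur
      have hmono := gre_mono rest st.length
      simp only [gmchA, hc, h1, h2, List.length_append, List.length_cons,
        List.length_nil]
      have hle : m + (gre rest (st.length + 1)).1 + ((gre rest (st.length + 1)).2.1 : Int) ≤
          m + 1 + (gre rest st.length).1 + ((gre rest st.length).2.1 : Int) := by omega
      simp only [if_pos hle, gre]
      simp
    · cases st with
      | nil =>
        have h := ih (m + 1) [] cur
        simp only [gmchA, hc, List.isEmpty_nil, h]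
        cases hd : gre rest 0 with
        | mk a bc =>
          simp [gre, hc, hd]
          ring
      | cons s st' =>
        have h := ih m (s :: st').dropLast (cur ++ [')'])
        have hlen : ((s :: st').dropLast).length = st'.length := by
          simp
        simp [gmchA, hc, h, hlen, gre]

-- ===== VERDICT (by name: the statement is the Claim_ definition above) =====
theorem get_min_changes_helper_spec : Claim_equal_get_min_changes_helper := by
  intro string modifications stack current _
  unfold Spec_get_min_changes_helper get_min_changes_helper get_min_changes_helper_alt
  rw [gmchA_eq_gre, bLoop_eq_gre]
  simp
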